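-- pv_equiv track=rewrite | github.com/chrisjdavie/interview_practice | my_own/indices_product/revisited_0.py | product_indices
-- ===== SOURCE A (Python) =====
-- from typing import Iterator
--
-- def product_indices(base: int) -> Iterator[tuple[int,...]]:
--
--     indices: list[int] = [0]* (base + 1)
--     current_pos: int = base
--
--     while current_pos >= 0:
--
--         yield tuple(indices)
--
--         indices[-1] += 1
--         current_pos: int = base
--         while current_pos >= 0 and indices[current_pos] > base:
--             indices[current_pos] = 0
--             current_pos -= 1
--             indices[current_pos] += 1
-- ===== SOURCE B (Python) =====
-- def product_indices(base):
--     # Recursive cartesian-product generator over base+1 positions (leftmost digit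
--     # chosen in the outer loop, so tuples come out in the same lexicographic order
--     # as the odometer). Yields nothing for base < 0.
--     if base < 0:
--         return
--
--     def rec(n):
--         if n == 0:
--             yield ()
--             return
--         for d in range(base + 1):
--             for rest in rec(n - 1):
--                 yield (d,) + rest
--
--     yield from rec(base + 1)
-- ===== Notes on version B (the rewrite author's own statement) =====
-- stated objective: alternative
-- what changed: Replaces the iterative odometer (a while loop mutating the digit list in place with increment-and-carry) by a recursive cartesian-product generator over the positions, choosing the most significant digit in the outer loop.
import Mathlib
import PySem

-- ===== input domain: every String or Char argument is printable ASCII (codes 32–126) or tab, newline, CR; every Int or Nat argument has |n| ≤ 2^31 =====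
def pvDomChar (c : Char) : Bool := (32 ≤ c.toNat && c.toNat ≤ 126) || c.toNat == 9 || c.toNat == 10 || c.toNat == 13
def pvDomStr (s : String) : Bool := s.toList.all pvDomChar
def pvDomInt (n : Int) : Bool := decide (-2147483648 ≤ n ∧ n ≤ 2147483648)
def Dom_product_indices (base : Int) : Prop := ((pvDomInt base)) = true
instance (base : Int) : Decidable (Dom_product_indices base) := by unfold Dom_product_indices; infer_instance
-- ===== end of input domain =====

-- B replaces A's iterative odometer (in-place increment with carry) by a recursive
-- cartesian-product generator over the positions; same output, alternative algorithm.
-- A is a generator; compared here as the list of yielded tuples.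

-- ===== PORT A =====
-- inner `while current_pos >= 0 and indices[current_pos] > base` loop of A
-- (list indexing/assignment via PySem pyGetD/pySetD; every access A makes is in range)
def pvCarryA (base : Int) (indices : List Int) (cp : Int) : List Int × Int :=
  if h : 0 ≤ cp ∧ base < PySem.List.pyGetD indices cp 0 then
    let indices1 := PySem.List.pySetD indices cp 0
    let cp1 := cp - 1
    let indices2 := PySem.List.pySetD indices1 cp1 (PySem.List.pyGetD indices1 cp1 0 + 1)
    pvCarryA base indices2 cp1
  else (indices, cp)
termination_by (cp + 1).toNat
decreasing_by omega

-- outer `while current_pos >= 0` loop of A; fuel only makes the recursion structural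
def pvLoopA (base : Int) (indices : List Int) (cp : Int) : Nat → List (List Int)
  | 0 => []
  | fuel + 1 =>
    if 0 ≤ cp then
      let indices1 := PySem.List.pySetD indices (-1) (PySem.List.pyGetD indices (-1) 0 + 1)
      let s := pvCarryA base indices1 base
      indices :: pvLoopA base s.1 s.2 fuel
    else []

def product_indices (base : Int) : List (List Int) :=
  pvLoopA base (List.replicate (base + 1).toNat 0) base
    ((base + 1).toNat ^ (base + 1).toNat + 1)

-- ===== PORT B =====
-- Source B's rec(n): tuples of length n, most-significant digit chosen in the outer loop
def pvRecB (base : Int) : Nat → List (List Int)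
  | 0 => [[]]
  | n + 1 =>
    (PySem.List.pyRange 0 (base + 1) 1).flatMap
      (fun d => (pvRecB base n).map (fun rest => d :: rest))

def product_indices_alt (base : Int) : List (List Int) :=
  if base < 0 then [] else pvRecB base (base + 1).toNat

-- ===== PRECONDITION & SPEC =====
def Spec_product_indices (base : Int) (out : List (List Int)) : Prop := out = product_indices_alt base
instance (base : Int) (out : List (List Int)) : Decidable (Spec_product_indices base out) := by unfold Spec_product_indices; infer_instance

-- ===== CLAIM (what is proved, stated in full; the proofs are below) =====
def Claim_equal_product_indices : Prop := ∀ (base : Int), Dom_product_indices base → Spec_product_indices base (product_indices base)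

-- ===== LEMMAS AND PROOFS =====

-- digits are in [0, base]
def pvValid (base : Int) (l : List Int) : Prop := ∀ x ∈ l, 0 ≤ x ∧ x ≤ base

-- value of a reversed digit string (least-significant digit first), radix R
def pvValR (R : Nat) : List Int → Nat
  | [] => 0
  | d :: r => d.toNat + R * pvValR R r

-- specification of A's carry loop on the REVERSED digit string
def pvCR (base : Int) : List Int → Option (List Int)
  | [] => none
  | [d] => if d ≤ base then some [d] else none
  | d :: e :: r' =>
    if d ≤ base then some (d :: e :: r')
    else (pvCR base ((e + 1) :: r')).map (fun l => 0 :: l)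
termination_by l => l.length
decreasing_by simp

-- successor (odometer step) on the reversed digit string
def pvInc (base : Int) : List Int → Option (List Int)
  | [] => none
  | a :: rr => pvCR base ((a + 1) :: rr)

theorem pv_set_append_length {x v : Int} (l z : List Int) :
    (l ++ x :: z).set l.length v = l ++ v :: z := by
  induction l with
  | nil => simp
  | cons a l ih => simp [ih]

theorem pv_getD_append_length (l z : List Int) (x : Int) :
    (l ++ x :: z).getD l.length 0 = x := by
  rw [List.getD_eq_getElem?_getD, List.getElem?_append_right (by omega)]
  simp

theorem pvCarryA_stop (base : Int) (indices : List Int) (cp : Int)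
    (h : ¬(0 ≤ cp ∧ base < PySem.List.pyGetD indices cp 0)) :
    pvCarryA base indices cp = (indices, cp) := by
  rw [pvCarryA, dif_neg h]

theorem pvCarryA_step (base : Int) (indices : List Int) (cp : Int)
    (h0 : 0 ≤ cp) (h1 : base < PySem.List.pyGetD indices cp 0) :
    pvCarryA base indices cp =
      pvCarryA base
        (PySem.List.pySetD (PySem.List.pySetD indices cp 0) (cp - 1)
          (PySem.List.pyGetD (PySem.List.pySetD indices cp 0) (cp - 1) 0 + 1)) (cp - 1) := by
  rw [pvCarryA, dif_pos ⟨h0, h1⟩]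

-- xs[-1] = xs[-1] + 1 assignment on a nonempty list (exact: index -1 is in range)
theorem pv_pySetD_neg_one (xs : List Int) (x w : Int) :
    PySem.List.pySetD (xs ++ [x]) (-1) w = xs ++ [w] := by
  simp [PySem.List.pySetD, PySem.List.pySet?, PySem.List.pyIdx?]

theorem pv_pyGetD_append (l z : List Int) (x : Int) :
    PySem.List.pyGetD (l.reverse ++ x :: z) ((l.length : Int)) 0 = x := by
  rw [show ((l.length : Int)) = ((l.reverse.length : Int)) by simp, PySem.List.pyGetD_natCast]
  exact pv_getD_append_length _ _ _

theorem pv_pySetD_append (l z : List Int) (x v : Int) :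
    PySem.List.pySetD (l.reverse ++ x :: z) ((l.length : Int)) v = l.reverse ++ v :: z := by
  rw [show ((l.length : Int)) = ((l.reverse.length : Int)) by simp, PySem.List.pySetD_natCast]
  exact pv_set_append_length _ _

theorem pvCarryA_char (base : Int) : ∀ (n : Nat) (r z : List Int), r.length ≤ n → r ≠ [] →
    match pvCR base r with
    | some r' => ∃ cp', pvCarryA base (r.reverse ++ z) ((r.length : Int) - 1) = (r'.reverse ++ z, cp') ∧ 0 ≤ cp'
    | none => (pvCarryA base (r.reverse ++ z) ((r.length : Int) - 1)).2 < 0 := by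
  intro n
  induction n with
  | zero =>
    intro r z h hr
    cases r with
    | nil => exact absurd rfl hr
    | cons d rest => simp at h
  | succ n ih =>
    intro r z hlen hr
    obtain ⟨d, rest, rfl⟩ : ∃ d rest, r = d :: rest := by
      cases r with
      | nil => exact absurd rfl hr
      | cons d rest => exact ⟨d, rest, rfl⟩
    have hcp : ((d :: rest).length : Int) - 1 = (rest.length : Int) := by simp
    have hrev : (d :: rest).reverse ++ z = rest.reverse ++ d :: z := by simp
    have hg : PySem.List.pyGetD ((d :: rest).reverse ++ z) (((d :: rest).length : Int) - 1) 0 = d := by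
      rw [hcp, hrev]; exact pv_pyGetD_append rest z d
    by_cases hd : base < d
    · cases rest with
      | nil =>
        have hcr : pvCR base [d] = none := by simp [pvCR, not_le.mpr hd]
        rw [hcr]
        rw [pvCarryA_step base _ _ (by simp) (by rw [hg]; exact hd)]
        rw [pvCarryA_stop base _ _ (by intro h; revert h; simp)]
        simp
      | cons e rest' =>
        have hcr : pvCR base (d :: e :: rest')
            = (pvCR base ((e + 1) :: rest')).map (fun l => 0 :: l) := by
          simp [pvCR, not_le.mpr hd]
        have hstep : pvCarryA base ((d :: e :: rest').reverse ++ z) (((d :: e :: rest').length : Int) - 1)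
            = pvCarryA base (((e + 1) :: rest').reverse ++ (0 :: z)) ((((e + 1) :: rest').length : Int) - 1) := by
          rw [pvCarryA_step base _ _ (by rw [hcp]; positivity) (by rw [hg]; exact hd)]
          have e1 : PySem.List.pySetD ((d :: e :: rest').reverse ++ z) (((d :: e :: rest').length : Int) - 1) 0
              = rest'.reverse ++ e :: 0 :: z := by
            rw [hcp, hrev]
            have := pv_pySetD_append (e :: rest') z d 0
            simp only [List.reverse_cons] at this ⊢
            simpa using this
          have e2 : (((d :: e :: rest').length : Int) - 1) - 1 = ((rest'.length : Int)) := by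
            rw [hcp]; simp
          rw [e1, e2, pv_pyGetD_append rest' (0 :: z) e, pv_pySetD_append rest' (0 :: z) e (e + 1)]
          have e3 : rest'.reverse ++ (e + 1) :: 0 :: z = ((e + 1) :: rest').reverse ++ (0 :: z) := by simp
          have e4 : ((rest'.length : Int)) = (((e + 1) :: rest').length : Int) - 1 := by simp
          rw [e3, e4]
        have H := ih ((e + 1) :: rest') (0 :: z) (by simp at hlen ⊢; omega) (by simp)
        rw [hcr]
        cases hc : pvCR base ((e + 1) :: rest') with
        | none =>
          rw [hc] at H
          simp only [Option.map_none]
          rw [hstep]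
          exact H
        | some r'' =>
          rw [hc] at H
          obtain ⟨cp', heq, hpos⟩ := H
          refine ⟨cp', ?_, hpos⟩
          rw [hstep, heq]
          simp
    · have hcr : pvCR base (d :: rest) = some (d :: rest) := by
        cases rest <;> simp [pvCR, not_lt.mp hd]
      rw [hcr]
      refine ⟨(rest.length : Int), ?_, by positivity⟩
      rw [pvCarryA_stop base _ _ (by intro h; exact hd (hg ▸ h.2)), hcp]

theorem pvValR_lt (base : Int) (R : Nat) (hR : R = (base + 1).toNat) (hb : 0 ≤ base) :
    ∀ r, pvValid base r → pvValR R r < R ^ r.length := by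
  intro r hr
  induction r with
  | nil => simp [pvValR]
  | cons d t ih =>
    have hd := hr d (by simp)
    have ht := ih (fun x hx => hr x (by simp [hx]))
    have h1 : d.toNat < R := by omega
    calc d.toNat + R * pvValR R t < R + R * pvValR R t := by omega
      _ = R * (pvValR R t + 1) := by ring
      _ ≤ R * R ^ t.length := Nat.mul_le_mul_left R ht
      _ = R ^ (d :: t).length := by rw [List.length_cons, pow_succ]; ring

theorem pvInc_char (base : Int) (R : Nat) (hR : R = (base + 1).toNat) (hb : 0 ≤ base) :
    ∀ r, pvValid base r → r ≠ [] →
    if pvValR R r + 1 < R ^ r.length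
    then ∃ r', pvInc base r = some r' ∧ pvValid base r' ∧ r'.length = r.length ∧
          pvValR R r' = pvValR R r + 1
    else pvInc base r = none := by
  intro r
  induction r with
  | nil => intro _ h; exact absurd rfl h
  | cons a rr ih =>
    intro hv _
    have ha := hv a (by simp)
    have hvrr : pvValid base rr := fun x hx => hv x (by simp [hx])
    by_cases hab : a + 1 ≤ base
    · -- head digit can be incremented in place
      have hcr : pvCR base ((a + 1) :: rr) = some ((a + 1) :: rr) := by
        cases rr <;> simp [pvCR, hab]
      have hv' : pvValid base ((a + 1) :: rr) := by
        intro x hx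
        rcases List.mem_cons.mp hx with h | h
        · subst h; omega
        · exact hvrr x h
      have hval : pvValR R ((a + 1) :: rr) = pvValR R (a :: rr) + 1 := by
        simp only [pvValR]; omega
      have hlt : pvValR R (a :: rr) + 1 < R ^ (a :: rr).length := by
        have h := pvValR_lt base R hR hb _ hv'
        simp only [List.length_cons] at h ⊢
        omega
      rw [if_pos hlt]
      exact ⟨(a + 1) :: rr, by simp [pvInc, hcr], hv', by simp, hval⟩
    · -- head digit is base: it wraps to 0 and the carry moves on
      have haeq : a = base := by omega
      have hRpos : 0 < R := by omega
      cases rr with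
      | nil =>
        rw [if_neg]
        · simp [pvInc, pvCR, hab]
        · simp only [pvValR, List.length_cons, List.length_nil, zero_add, pow_one]
          omega
      | cons e rr' =>
        have hcr : pvInc base (a :: e :: rr') = (pvInc base (e :: rr')).map (fun l => 0 :: l) := by
          simp [pvInc, pvCR, hab]
        have hval : pvValR R (a :: e :: rr') + 1 = R * (pvValR R (e :: rr') + 1) := by
          simp only [pvValR]
          have : a.toNat + 1 = R := by omega
          ring_nf
          omega
        have hcond : (pvValR R (a :: e :: rr') + 1 < R ^ (a :: e :: rr').length)
            ↔ (pvValR R (e :: rr') + 1 < R ^ (e :: rr').length) := by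
          rw [hval, List.length_cons, pow_succ, mul_comm (R ^ (e :: rr').length) R]
          exact Nat.mul_lt_mul_left hRpos
        have := ih hvrr (by simp)
        split at this
        · obtain ⟨r'', h1, h2, h3, h4⟩ := this
          rw [if_pos (hcond.mpr (by assumption))]
          refine ⟨0 :: r'', by simp [hcr, h1], ?_, by simpa using h3, ?_⟩
          · intro x hx
            rcases List.mem_cons.mp hx with h | h
            · subst h; omega
            · exact h2 x h
          · have h0 : pvValR R (0 :: r'') = R * pvValR R r'' := by simp [pvValR]
            rw [h0, h4, hval]
        · rw [if_neg (by rw [hcond]; assumption)]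
          rw [hcr, this]
          rfl

theorem pvValR_append (R : Nat) (x y : List Int) :
    pvValR R (x ++ y) = pvValR R x + R ^ x.length * pvValR R y := by
  induction x with
  | nil => simp [pvValR]
  | cons d x ih => simp [pvValR, ih, pow_succ]; ring

theorem pvRecB_length (base : Int) (R : Nat) (hR : R = (base + 1).toNat) (hb : 0 ≤ base) :
    ∀ m, (pvRecB base m).length = R ^ m := by
  intro m
  induction m with
  | zero => simp [pvRecB]
  | succ m ih =>
    simp only [pvRecB, List.length_flatMap, List.length_map, ih]
    rw [List.map_const', List.sum_replicate, PySem.List.length_pyRange_one, smul_eq_mul]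
    have h : (base + 1 - 0).toNat = R := by omega
    rw [h, pow_succ]
    ring

theorem pv_flatMap_get (f : Int → List (List Int)) (B : Nat) (hB : ∀ a, (f a).length = B) :
    ∀ (L : List Int) (i j : Nat) (hi : i < L.length), j < B →
      (L.flatMap f)[i * B + j]? = (f (L[i]'hi))[j]? := by
  intro L
  induction L with
  | nil => intro i j hi; simp at hi
  | cons a L ih =>
    intro i j hi hj
    cases i with
    | zero =>
      simp only [List.flatMap_cons, Nat.zero_mul, Nat.zero_add, List.getElem_cons_zero]
      rw [List.getElem?_append_left (by rw [hB]; exact hj)]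
    | succ i =>
      have harith : (i + 1) * B + j = B + (i * B + j) := by ring
      simp only [List.flatMap_cons, List.getElem_cons_succ, harith]
      rw [List.getElem?_append_right (by rw [hB]; omega)]
      rw [hB, Nat.add_sub_cancel_left]
      exact ih i j (by simpa using hi) hj

theorem pvRecB_get (base : Int) (R : Nat) (hR : R = (base + 1).toNat) (hb : 0 ≤ base) :
    ∀ m v, pvValid base v → v.length = m →
      (pvRecB base m)[pvValR R v.reverse]? = some v := by
  intro m
  induction m with
  | zero =>
    intro v _ hlen
    rw [List.eq_nil_of_length_eq_zero hlen]
    simp [pvRecB, pvValR]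
  | succ m ih =>
    intro v hv hlen
    obtain ⟨d, t, rfl⟩ : ∃ d t, v = d :: t := by
      cases v with
      | nil => simp at hlen
      | cons d t => exact ⟨d, t, rfl⟩
    have hd := hv d (by simp)
    have hvt : pvValid base t := fun x hx => hv x (by simp [hx])
    have hlt : t.length = m := by simpa using hlen
    have hidx : pvValR R (d :: t).reverse
        = d.toNat * R ^ m + pvValR R t.reverse := by
      rw [List.reverse_cons, pvValR_append]
      simp [pvValR, List.length_reverse, hlt]
      ring
    have hjlt : pvValR R t.reverse < R ^ m := by
      have := pvValR_lt base R hR hb t.reverse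
        (fun x hx => hvt x (List.mem_reverse.mp hx))
      simpa [hlt] using this
    have hdlt : d.toNat < (PySem.List.pyRange 0 (base + 1) 1).length := by
      rw [PySem.List.length_pyRange_one]
      omega
    have hget := pv_flatMap_get (fun a => (pvRecB base m).map (fun rest => a :: rest))
      (R ^ m) (by intro a; simp [pvRecB_length base R hR hb m])
      (PySem.List.pyRange 0 (base + 1) 1) d.toNat (pvValR R t.reverse) hdlt hjlt
    have helt : (PySem.List.pyRange 0 (base + 1) 1)[d.toNat]'hdlt = d := by
      rw [PySem.List.getElem_pyRange_one]
      omega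
    rw [hidx, pvRecB]
    rw [show d.toNat * R ^ m + pvValR R t.reverse
        = d.toNat * R ^ m + pvValR R t.reverse from rfl]
    rw [hget, helt]
    simp [ih t hvt hlt]

theorem pvValR_replicate (R : Nat) : ∀ n, pvValR R (List.replicate n 0) = 0
  | 0 => by simp [pvValR]
  | n + 1 => by simp [List.replicate_succ, pvValR, pvValR_replicate R n]

theorem pvLoopA_neg (base : Int) (v : List Int) (cp : Int) (fuel : Nat) (h : cp < 0) :
    pvLoopA base v cp fuel = [] := by
  cases fuel <;> simp [pvLoopA, not_le.mpr h]

theorem pvLoopA_char (base : Int) (R : Nat) (hR : R = (base + 1).toNat) (hb : 0 ≤ base) :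
    ∀ (fuel : Nat) (v : List Int) (cp : Int), pvValid base v → v.length = R → 0 ≤ cp →
      R ^ R - pvValR R v.reverse ≤ fuel →
      pvLoopA base v cp fuel = (pvRecB base R).drop (pvValR R v.reverse) := by
  intro fuel
  induction fuel with
  | zero =>
    intro v cp hv hlenv hcp hfuel
    exfalso
    have h := pvValR_lt base R hR hb v.reverse (fun x hx => hv x (List.mem_reverse.mp hx))
    rw [List.length_reverse, hlenv] at h
    omega
  | succ k ih =>
    intro v cp hv hlenv hcp hfuel
    have hvrev : pvValid base v.reverse := fun x hx => hv x (List.mem_reverse.mp hx)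
    have hvallt : pvValR R v.reverse < R ^ R := by
      have h := pvValR_lt base R hR hb v.reverse hvrev
      rwa [List.length_reverse, hlenv] at h
    obtain ⟨a, rr, hrev⟩ : ∃ a rr, v.reverse = a :: rr := by
      cases hv' : v.reverse with
      | nil =>
        exfalso
        have := congrArg List.length hv'
        simp [hlenv] at this
        omega
      | cons a rr => exact ⟨a, rr, rfl⟩
    have hveq : v = rr.reverse ++ [a] := by
      rw [← List.reverse_reverse v, hrev]; simp
    have lenR : ((a + 1) :: rr).length = R := by
      have := congrArg List.length hrev
      simp [hlenv] at this
      simp [this]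
    have hget : PySem.List.pyGetD v (-1) 0 = a := by
      rw [hveq]; exact PySem.List.pyGetD_neg_one_append_singleton rr.reverse a 0
    have hset : PySem.List.pySetD v (-1) (PySem.List.pyGetD v (-1) 0 + 1)
        = ((a + 1) :: rr).reverse := by
      rw [hget, hveq, pv_pySetD_neg_one]; simp
    have hbase : base = (((a + 1) :: rr).length : Int) - 1 := by
      rw [lenR]; omega
    have H := pvCarryA_char base R ((a + 1) :: rr) [] (le_of_eq lenR) (by simp)
    have hinc : pvCR base ((a + 1) :: rr) = pvInc base v.reverse := by rw [hrev]; rfl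
    have HI := pvInc_char base R hR hb v.reverse hvrev (by rw [hrev]; simp)
    rw [List.length_reverse, hlenv] at HI
    simp only [pvLoopA, if_pos hcp]
    by_cases hcond : pvValR R v.reverse + 1 < R ^ R
    · rw [if_pos hcond] at HI
      obtain ⟨r', hinc', hval', hlen', hvr'⟩ := HI
      rw [hinc, hinc'] at H
      obtain ⟨cp', heq, hcp'⟩ := H
      simp only [List.append_nil] at heq
      rw [← hbase] at heq
      rw [hset, heq]
      have hlenr' : r'.reverse.length = R := by
        rw [List.length_reverse]; exact hlen'
      have htail := ih r'.reverse cp'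
        (fun x hx => hval' x (List.mem_reverse.mp hx)) hlenr' hcp'
        (by rw [List.reverse_reverse, hvr']; omega)
      rw [List.reverse_reverse, hvr'] at htail
      rw [htail]
      have hreclen : (pvRecB base R).length = R ^ R := pvRecB_length base R hR hb R
      have hlt' : pvValR R v.reverse < (pvRecB base R).length := by rw [hreclen]; exact hvallt
      conv_rhs => rw [List.drop_eq_getElem_cons hlt']
      have hrecget := pvRecB_get base R hR hb R v hv hlenv
      rw [List.getElem?_eq_getElem hlt'] at hrecget
      rw [Option.some.injEq] at hrecget
      rw [hrecget]
    · rw [if_neg hcond] at HI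
      rw [hinc, HI] at H
      simp only [List.append_nil] at H
      rw [← hbase] at H
      rw [hset]
      rw [pvLoopA_neg base _ _ k H]
      have hreclen : (pvRecB base R).length = R ^ R := pvRecB_length base R hR hb R
      have hlt' : pvValR R v.reverse < (pvRecB base R).length := by rw [hreclen]; exact hvallt
      conv_rhs => rw [List.drop_eq_getElem_cons hlt']
      have hrecget := pvRecB_get base R hR hb R v hv hlenv
      rw [List.getElem?_eq_getElem hlt'] at hrecget
      rw [Option.some.injEq] at hrecget
      rw [hrecget, List.drop_eq_nil_of_le (by rw [hreclen]; omega)]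

-- ===== VERDICT (by name: the statement is the Claim_ definition above) =====
theorem product_indices_spec : Claim_equal_product_indices := by
  intro base _
  unfold Spec_product_indices product_indices product_indices_alt
  by_cases hb : base < 0
  · have h0 : (base + 1).toNat = 0 := by omega
    rw [pvLoopA_neg base _ _ _ hb]
    simp [hb]
  · push Not at hb
    set R := (base + 1).toNat with hR
    have hv : pvValid base (List.replicate R 0) := by
      intro x hx
      simp [List.eq_of_mem_replicate hx]; omega
    have hval : pvValR R (List.replicate R 0).reverse = 0 := by
      rw [List.reverse_replicate]; exact pvValR_replicate R R
    rw [pvLoopA_char base R hR hb _ _ base hv (by simp) hb (by omega), hval]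
    simp [hb.not_gt]
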